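-- pv_equiv track=rewrite | github.com/edkins/fwg2 | terminal_al_prepare.py | process_words
-- ===== SOURCE A (Python) =====
-- def process_words(ws:list[str]) -> str:
--     result = []
--     start = True
--     for w in ws:
--         if w == "''":
--             p = '"'
--             start = False
--         elif w == '``':
--             p = ' "'
--             start = True
--         elif w == "." or w == ",":
--             p = w
--             start = False
--         else:
--             if start:
--                 p = w
--             else:
--                 p = ' ' + w
--             start = False
--         result.append(p)
--     return ''.join(result)
-- ===== SOURCE B (Python) =====
-- def process_words(ws):
--     # Different algorithm: split the token stream into groups at each '``'
--     # (which always contributes ' "'); inside a group only the group's first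
--     # token can skip its leading space, so no running state flag is needed.
--     groups = []
--     cur = []
--     for w in ws:
--         if w == '``':
--             groups.append(cur)
--             cur = []
--         else:
--             cur.append(w)
--     groups.append(cur)
--
--     def render(g):
--         return ''.join(
--             '"' if w == "''"
--             else w if w in ('.', ',') or j == 0
--             else ' ' + w
--             for j, w in enumerate(g))
--
--     return ' "'.join(render(g) for g in groups)
-- ===== Notes on version B (the rewrite author's own statement) =====
-- stated objective: alternative
-- what changed: Replaces A's single stateful loop (a mutable start flag threaded through every token) with a split/render/join pipeline: the stream is split into groups at each '``' token, each group is rendered independently (a leading space exactly for non-first regular tokens), and the groups are joined with ' "'.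
import Mathlib
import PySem

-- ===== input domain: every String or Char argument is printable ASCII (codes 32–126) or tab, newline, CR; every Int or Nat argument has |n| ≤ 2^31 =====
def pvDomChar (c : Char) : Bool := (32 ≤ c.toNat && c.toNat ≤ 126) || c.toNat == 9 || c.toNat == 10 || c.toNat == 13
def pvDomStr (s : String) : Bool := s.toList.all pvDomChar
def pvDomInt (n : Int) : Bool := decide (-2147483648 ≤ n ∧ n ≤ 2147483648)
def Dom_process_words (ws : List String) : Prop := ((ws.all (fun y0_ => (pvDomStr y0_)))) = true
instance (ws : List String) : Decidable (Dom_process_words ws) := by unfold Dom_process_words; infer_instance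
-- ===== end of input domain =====

-- B replaces A's stateful flag loop by a split-at-'``' / render-groups / join-with-' "' pipeline (objective: alternative).

-- ===== PORT A =====
-- A-side helper: the loop body over the state (result list, start flag)
def stepA (st : List String × Bool) (w : String) : List String × Bool :=
  if w == "''" then (st.1 ++ ["\""], false)
  else if w == "``" then (st.1 ++ [" \""], true)
  else if w == "." || w == "," then (st.1 ++ [w], false)
  else if st.2 then (st.1 ++ [w], false)
  else (st.1 ++ [" " ++ w], false)

def process_words (ws : List String) : String :=
  PySem.Str.join "" (ws.foldl stepA ([], true)).1

-- ===== PORT B =====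
-- B-side helper: the splitting loop body over the state (finished groups, current group)
def splitStep (st : List (List String) × List String) (w : String) :
    List (List String) × List String :=
  if w == "``" then (st.1 ++ [st.2], []) else (st.1, st.2 ++ [w])

-- B-side helper: render one group (leading space exactly for non-first regular tokens)
def renderB (g : List String) : String :=
  PySem.Str.join "" ((PySem.List.enumerate g 0).map fun p =>
    if p.2 == "''" then "\""
    else if p.2 == "." || p.2 == "," || p.1 == 0 then p.2
    else " " ++ p.2)

def process_words_alt (ws : List String) : String :=
  let st := ws.foldl splitStep ([], [])
  PySem.Str.join " \"" ((st.1 ++ [st.2]).map renderB)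

-- ===== PRECONDITION & SPEC =====
def Spec_process_words (ws : List String) (out : String) : Prop := out = process_words_alt ws
instance (ws : List String) (out : String) : Decidable (Spec_process_words ws out) := by
  unfold Spec_process_words; infer_instance

-- ===== CLAIM =====
def Claim_equal_process_words : Prop :=
  ∀ (ws : List String), Dom_process_words ws → Spec_process_words ws (process_words ws)

-- ===== LEMMAS AND PROOFS =====
-- the piece A emits given the start flag
def pA (s : Bool) (w : String) : String :=
  if w == "''" then "\""
  else if w == "``" then " \""
  else if w == "." || w == "," then w
  else if s then w else " " ++ w

-- the full piece list A produces from a given start flag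
def piecesFrom (s : Bool) : List String → List String
  | [] => []
  | w :: rest => pA s w :: piecesFrom (w == "``") rest

lemma stepA_eq (acc : List String) (s : Bool) (w : String) :
    stepA (acc, s) w = (acc ++ [pA s w], w == "``") := by
  simp only [stepA, pA]
  split_ifs with h1 h2 h3 h4 <;> simp_all

lemma foldl_stepA (ws : List String) (acc : List String) (s : Bool) :
    (ws.foldl stepA (acc, s)).1 = acc ++ piecesFrom s ws := by
  induction ws generalizing acc s with
  | nil => simp [piecesFrom]
  | cons w rest ih =>
    simp only [List.foldl, stepA_eq, piecesFrom, ih, List.append_assoc, List.singleton_append]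

-- join facts
lemma jcons (sep a b : String) (l : List String) :
    PySem.Str.join sep (a :: b :: l) = a ++ sep ++ PySem.Str.join sep (b :: l) := by
  simp [PySem.Str.join, PySem.Chars.join, List.intercalate, String.append_assoc]

lemma jsingle (sep x : String) : PySem.Str.join sep [x] = x := by
  simp [PySem.Str.join, PySem.Chars.join, List.intercalate]

lemma jnil_cons (x : String) (l : List String) :
    PySem.Str.join "" (x :: l) = x ++ PySem.Str.join "" l := by
  cases l with
  | nil => simp [PySem.Str.join, PySem.Chars.join, List.intercalate]
  | cons y ys => rw [jcons]; simp

lemma jlast (sep x : String) (l : List String) (h : l ≠ []) :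
    PySem.Str.join sep (l ++ [x]) = PySem.Str.join sep l ++ sep ++ x := by
  induction l with
  | nil => simp at h
  | cons y ys ih =>
    cases ys with
    | nil =>
      simp only [List.cons_append, List.nil_append, jcons]
      simp [PySem.Str.join, PySem.Chars.join, List.intercalate, String.append_assoc]
    | cons z zs =>
      have ih' := ih (by simp)
      simp only [List.cons_append] at ih' ⊢
      rw [jcons, ih', jcons]
      simp [String.append_assoc]

lemma jlast_ext (sep a b : String) (l : List String) :
    PySem.Str.join sep (l ++ [a ++ b]) = PySem.Str.join sep (l ++ [a]) ++ b := by
  cases l with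
  | nil => simp [jsingle]
  | cons y ys =>
    rw [jlast sep (a ++ b) _ (by simp), jlast sep a _ (by simp)]
    simp [String.append_assoc]

lemma jnil (sep : String) : PySem.Str.join sep [] = "" := by
  simp [PySem.Str.join, PySem.Chars.join, List.intercalate]

lemma renderB_nil : renderB [] = "" := by decide

lemma enum_append (l : List String) (x : String) (n : Int) :
    PySem.List.enumerate (l ++ [x]) n
      = PySem.List.enumerate l n ++ [((n + l.length : Int), x)] := by
  induction l generalizing n with
  | nil => simp [PySem.List.enumerate_nil, PySem.List.enumerate_cons]
  | cons y ys ih =>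
    simp only [List.cons_append, PySem.List.enumerate_cons, ih, List.length_cons]
    push_cast
    ring_nf

lemma renderB_append (cur : List String) (w : String) (hw : (w == "``") = false) :
    renderB (cur ++ [w]) = renderB cur ++ pA (cur == []) w := by
  cases cur with
  | nil =>
    simp only [List.nil_append, renderB, PySem.List.enumerate_cons,
      PySem.List.enumerate_nil, List.map_cons, List.map_nil, jsingle]
    simp only [pA, hw]
    split_ifs with h1 h2 h3 <;> simp_all [jnil]
  | cons c cs =>
    unfold renderB
    rw [enum_append, List.map_append, List.map_cons, List.map_nil]
    rw [jlast "" _ _ (by simp [PySem.List.enumerate_cons])]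
    have hidx : (((0 : Int) + ((c :: cs).length : Int)) == 0) = false := by
      simp [List.length_cons]
      omega
    have hne : ((c :: cs : List String) == []) = false := by simp
    simp only [pA, hw, hidx, hne]
    split_ifs with h1 h2 h3 <;> simp_all

lemma foldB (ws : List String) (acc : List (List String)) (cur : List String) :
    PySem.Str.join " \"" (((ws.foldl splitStep (acc, cur)).1
        ++ [(ws.foldl splitStep (acc, cur)).2]).map renderB)
      = PySem.Str.join " \"" ((acc ++ [cur]).map renderB)
        ++ PySem.Str.join "" (piecesFrom (cur == []) ws) := by
  induction ws generalizing acc cur with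
  | nil => simp [piecesFrom, PySem.Str.join, PySem.Chars.join, List.intercalate]
  | cons w rest ih =>
    by_cases hw : (w == "``") = true
    · have hw' : w = "``" := by simpa using hw
      subst hw'
      have hstep : splitStep (acc, cur) "``" = (acc ++ [cur], []) := by
        simp [splitStep]
      simp only [List.foldl, hstep, ih]
      rw [show (acc ++ [cur]) ++ [([] : List String)] = acc ++ [cur] ++ [[]] from rfl]
      rw [List.map_append (l₂ := [([] : List String)]), List.map_cons, List.map_nil]
      rw [jlast " \"" (renderB []) _ (by simp), renderB_nil]
      have hp : piecesFrom (cur == []) ("``" :: rest) = " \"" :: piecesFrom true rest := by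
        simp [piecesFrom, pA]
      rw [hp, jnil_cons]
      have hemp : (([] : List String) == []) = true := by simp
      rw [hemp]
      simp [String.append_assoc]
    · have hwf : (w == "``") = false := by simpa using hw
      have hstep : splitStep (acc, cur) w = (acc, cur ++ [w]) := by
        simp [splitStep, hwf]
      simp only [List.foldl, hstep, ih]
      have hne : ((cur ++ [w] : List String) == []) = false := by simp
      rw [hne]
      rw [show acc ++ [cur ++ [w]] = acc ++ [cur ++ [w]] from rfl]
      have hr : (acc ++ [cur ++ [w]]).map renderB
          = (acc.map renderB) ++ [renderB cur ++ pA (cur == []) w] := by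
        rw [List.map_append, List.map_cons, List.map_nil, renderB_append cur w hwf]
      rw [hr, jlast_ext]
      have hp : piecesFrom (cur == []) (w :: rest) = pA (cur == []) w :: piecesFrom false rest := by
        simp [piecesFrom, hwf]
      rw [hp, jnil_cons, List.map_append, List.map_cons, List.map_nil]
      simp [String.append_assoc]

-- ===== VERDICT =====
theorem process_words_spec : Claim_equal_process_words := by
  intro ws _
  unfold Spec_process_words process_words process_words_alt
  rw [foldl_stepA, List.nil_append, foldB]
  have hemp : (([] : List String) == []) = true := by simp
  rw [hemp]
  simp [renderB_nil, jsingle]
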